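-- pv_equiv track=rewrite | github.com/scafa-assistant/hivecore-v2 | engine/prompt_builder_v2.py | _extract_first_sections
-- ===== SOURCE A (Python) =====
-- def _extract_first_sections(md_text: str, count: int) -> str:
--     """Extrahiert die ersten N ## Sektionen aus Markdown."""
--     lines = md_text.split('\n')
--     result = []
--     section_count = 0
--
--     for line in lines:
--         if line.startswith('## '):
--             section_count += 1
--             if section_count > count:
--                 break
--         result.append(line)
--
--     return '\n'.join(result)
-- ===== SOURCE B (Python) =====
-- def _extract_first_sections(md_text: str, count: int) -> str:
--     """Extrahiert die ersten N ## Sektionen aus Markdown."""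
--     lines = md_text.split('\n')
--     headers = [i for i, line in enumerate(lines) if line.startswith('## ')]
--     n = max(count, 0)
--     cutoff = headers[n] if n < len(headers) else len(lines)
--     return '\n'.join(lines[:cutoff])
-- ===== Notes on version B (the rewrite author's own statement) =====
-- stated objective: alternative
-- what changed: Replaced A's interleaved accumulate-and-break loop with a find-header-indices-then-slice decomposition: collect the indices of '## ' lines, pick the cutoff index for max(count,0), and join a single slice of the lines.
import Mathlib
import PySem

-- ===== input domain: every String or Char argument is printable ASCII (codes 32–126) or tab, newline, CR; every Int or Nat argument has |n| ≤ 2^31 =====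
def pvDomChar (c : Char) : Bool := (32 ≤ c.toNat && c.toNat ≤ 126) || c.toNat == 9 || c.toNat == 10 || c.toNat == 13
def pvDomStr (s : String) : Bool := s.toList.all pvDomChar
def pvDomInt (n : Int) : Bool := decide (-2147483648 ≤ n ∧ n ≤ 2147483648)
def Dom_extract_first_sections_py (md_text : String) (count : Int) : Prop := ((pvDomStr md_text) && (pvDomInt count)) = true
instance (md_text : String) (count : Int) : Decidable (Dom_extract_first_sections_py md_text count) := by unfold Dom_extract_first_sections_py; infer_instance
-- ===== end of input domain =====

-- B replaces A's interleaved accumulate-and-break loop with a find-header-indices-then-slice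
-- decomposition (alternative, same linear cost).


-- ===== PORT A =====
-- A's for-loop with break: structural recursion over the lines carrying section_count.
def extractLoopA (lines : List String) (count : Int) (section_count : Int) : List String :=
  match lines with
  | [] => []
  | line :: rest =>
    if PySem.Str.startswith line "## " then
      if section_count + 1 > count then []
      else line :: extractLoopA rest count (section_count + 1)
    else line :: extractLoopA rest count section_count

def extract_first_sections_py (md_text : String) (count : Int) : String :=
  let lines := (PySem.Str.split? md_text "\n").getD []   -- split? is some: the separator "\n" is non-empty
  PySem.Str.join "\n" (extractLoopA lines count 0)

-- ===== PORT B =====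
-- the comprehension '[i for i, line in enumerate(lines) if line.startswith("## ")]'
def headerIdxs (lines : List String) (i : Nat) : List Nat :=
  match lines with
  | [] => []
  | line :: rest =>
    if PySem.Str.startswith line "## " then i :: headerIdxs rest (i + 1)
    else headerIdxs rest (i + 1)

def extract_first_sections_py_alt (md_text : String) (count : Int) : String :=
  let lines := (PySem.Str.split? md_text "\n").getD []   -- split? is some: the separator "\n" is non-empty
  let headers := headerIdxs lines 0
  let n := (max count 0).toNat
  let cutoff := (headers[n]?).getD lines.length   -- headers[n] if n < len(headers) else len(lines)
  PySem.Str.join "\n" (lines.take cutoff)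

-- ===== PRECONDITION & SPEC =====
def Spec_extract_first_sections_py (md_text : String) (count : Int) (out : String) : Prop := out = extract_first_sections_py_alt md_text count
instance (md_text : String) (count : Int) (out : String) : Decidable (Spec_extract_first_sections_py md_text count out) := by unfold Spec_extract_first_sections_py; infer_instance

-- ===== CLAIM (what is proved, stated in full; the proofs are below) =====
def Claim_equal_extract_first_sections_py : Prop := ∀ (md_text : String) (count : Int), Dom_extract_first_sections_py md_text count → Spec_extract_first_sections_py md_text count (extract_first_sections_py md_text count)

-- ===== LEMMAS AND PROOFS =====

-- index (from the front) of the (n+1)-th header line, or the length if there is none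
def hdrCut (lines : List String) (n : Nat) : Nat :=
  match lines with
  | [] => 0
  | line :: rest =>
    if PySem.Str.startswith line "## " then
      match n with
      | 0 => 0
      | m + 1 => 1 + hdrCut rest m
    else 1 + hdrCut rest n

theorem str_sw (line : String) :
    PySem.Str.startswith line "## " = PySem.Chars.startswith line.toList ['#', '#', ' '] := by
  simp

theorem extractLoopA_eq_take (lines : List String) (count section_count : Int) :
    extractLoopA lines count section_count
      = lines.take (hdrCut lines (count - section_count).toNat) := by
  induction lines generalizing section_count with
  | nil => simp [extractLoopA, hdrCut]
  | cons line rest ih =>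
    by_cases h : PySem.Chars.startswith line.toList ['#', '#', ' '] = true
    · by_cases hb : section_count + 1 > count
      · have h0 : (count - section_count).toNat = 0 := by omega
        simp [extractLoopA, hdrCut, h, hb, h0]
      · have h1 : (count - section_count).toNat = (count - (section_count + 1)).toNat + 1 := by omega
        simp [extractLoopA, hdrCut, h, hb, h1, ih]
        rw [Nat.add_comm, List.take_succ_cons]
    · simp [extractLoopA, hdrCut, h, ih]
      rw [Nat.add_comm, List.take_succ_cons]

theorem headerIdxs_shift (lines : List String) (i : Nat) :
    headerIdxs lines i = (headerIdxs lines 0).map (· + i) := by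
  induction lines generalizing i with
  | nil => simp [headerIdxs]
  | cons line rest ih =>
    by_cases h : PySem.Chars.startswith line.toList ['#', '#', ' '] = true
    · simp only [headerIdxs, str_sw]
      simp [h, ih (i + 1), ih 1, List.map_map]
      exact fun a _ => by omega
    · simp only [headerIdxs, str_sw]
      rw [if_neg h, if_neg h, ih (i + 1), ih 1, List.map_map]
      exact List.map_congr_left (by intro a _; simp; omega)

theorem headerIdxs_getD (lines : List String) (n : Nat) :
    ((headerIdxs lines 0)[n]?).getD lines.length = hdrCut lines n := by
  induction lines generalizing n with
  | nil => simp [headerIdxs, hdrCut]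
  | cons line rest ih =>
    by_cases h : PySem.Chars.startswith line.toList ['#', '#', ' '] = true
    · cases n with
      | zero => simp [headerIdxs, hdrCut, h]
      | succ m =>
        simp only [headerIdxs, hdrCut, str_sw]
        rw [headerIdxs_shift rest 1]
        simp only [h, if_pos, List.getElem?_cons_succ, List.getElem?_map]
        cases hx : (headerIdxs rest 0)[m]? with
        | none => simp [hx, ← ih m, List.length_cons]; omega
        | some v => simp [hx, ← ih m]; omega
    · simp only [headerIdxs, hdrCut, str_sw]
      rw [headerIdxs_shift rest 1]
      cases hx : (headerIdxs rest 0)[n]? with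
      | none => simp [hx, ← ih n, List.length_cons, h]; omega
      | some v => simp [hx, ← ih n, h]; omega

-- ===== VERDICT (by name: the statement is the Claim_ definition above) =====
theorem extract_first_sections_py_spec : Claim_equal_extract_first_sections_py := by
  intro md_text count _
  unfold Spec_extract_first_sections_py extract_first_sections_py extract_first_sections_py_alt
  simp only [extractLoopA_eq_take, headerIdxs_getD]
  have : (count - 0).toNat = (max count 0).toNat := by omega
  rw [this]
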